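-- pv_equiv track=rewrite | github.com/SeleneViramontes/C.A | P112-suma-pares-impares.py | suma_p_i
-- ===== SOURCE A (Python) =====
-- def suma_p_i(A,B,P_I):
--     suma=0
--
--     for i in range(A, B+1):
--         if (i%2==0) and (P_I=="P") :
--             suma += i
--         if (i%2!=0) and (P_I=="I"):
--             suma += i
--
--     return suma
-- ===== SOURCE B (Python) =====
-- def _sum_step2(lo, hi):
--     # sum of the arithmetic progression lo, lo+2, ..., hi (lo, hi same parity)
--     if lo > hi:
--         return 0
--     return ((hi - lo) // 2 + 1) * (lo + hi) // 2
--
-- def suma_p_i(A, B, P_I):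
--     if P_I == "P":
--         return _sum_step2(A + A % 2, B - B % 2)
--     if P_I == "I":
--         return _sum_step2(A + 1 - A % 2, B - 1 + B % 2)
--     return 0
-- ===== Notes on version B (the rewrite author's own statement) =====
-- stated objective: faster
-- what changed: Replaced the element-by-element loop over range(A, B+1) with a closed-form arithmetic-series formula over the first/last even (or odd) number in [A, B].
import Mathlib
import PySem

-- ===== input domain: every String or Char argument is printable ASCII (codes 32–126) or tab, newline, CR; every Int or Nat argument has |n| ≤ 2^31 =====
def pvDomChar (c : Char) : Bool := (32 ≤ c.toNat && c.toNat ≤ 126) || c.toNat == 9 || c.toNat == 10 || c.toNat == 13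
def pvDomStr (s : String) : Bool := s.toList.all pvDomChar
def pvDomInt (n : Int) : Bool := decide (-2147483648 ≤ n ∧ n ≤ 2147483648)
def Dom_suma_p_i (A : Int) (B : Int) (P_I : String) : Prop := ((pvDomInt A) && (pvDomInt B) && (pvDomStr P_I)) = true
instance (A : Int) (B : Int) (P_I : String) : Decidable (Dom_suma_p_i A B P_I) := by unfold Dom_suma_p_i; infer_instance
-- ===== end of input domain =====

-- B replaces A's element-by-element loop over range(A, B+1) with a closed-form
-- arithmetic-series formula (objective: faster, O(1) instead of O(B-A)).


-- ===== PORT A =====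
def suma_p_i (A : Int) (B : Int) (P_I : String) : Int :=
  (PySem.List.pyRange A (B + 1) 1).foldl
    (fun suma i =>
      let suma := if (PySem.Int.mod i 2 == 0) && (P_I == "P") then suma + i else suma
      if (!(PySem.Int.mod i 2 == 0)) && (P_I == "I") then suma + i else suma) 0

-- ===== PORT B =====
-- sum of the arithmetic progression lo, lo+2, ..., hi (lo, hi same parity)
def sumStep2 (lo : Int) (hi : Int) : Int :=
  if lo > hi then 0
  else PySem.Int.floordiv ((PySem.Int.floordiv (hi - lo) 2 + 1) * (lo + hi)) 2

def suma_p_i_alt (A : Int) (B : Int) (P_I : String) : Int :=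
  if P_I == "P" then sumStep2 (A + PySem.Int.mod A 2) (B - PySem.Int.mod B 2)
  else if P_I == "I" then sumStep2 (A + 1 - PySem.Int.mod A 2) (B - 1 + PySem.Int.mod B 2)
  else 0

-- ===== PRECONDITION & SPEC =====
def Spec_suma_p_i (A : Int) (B : Int) (P_I : String) (out : Int) : Prop := out = suma_p_i_alt A B P_I
instance (A : Int) (B : Int) (P_I : String) (out : Int) : Decidable (Spec_suma_p_i A B P_I out) := by unfold Spec_suma_p_i; infer_instance

-- ===== CLAIM (what is proved, stated in full; the proofs are below) =====
def Claim_equal_suma_p_i : Prop := ∀ (A : Int) (B : Int) (P_I : String), Dom_suma_p_i A B P_I → Spec_suma_p_i A B P_I (suma_p_i A B P_I)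

-- ===== LEMMAS AND PROOFS =====

lemma sumStep2_repr (lo : Int) (k : Int) (hk : 0 ≤ k) :
    sumStep2 lo (lo + 2 * k) = (k + 1) * (lo + k) := by
  unfold sumStep2
  rw [if_neg (by omega)]
  have h1 : PySem.Int.floordiv (lo + 2 * k - lo) 2 = k := by
    rw [PySem.Int.floordiv_eq_ediv_of_pos (by norm_num)]; omega
  rw [h1, PySem.Int.floordiv_eq_ediv_of_pos (by norm_num),
    show (k + 1) * (lo + (lo + 2 * k)) = 2 * ((k + 1) * (lo + k)) by ring,
    Int.mul_ediv_cancel_left _ (by norm_num)]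

lemma sumStep2_zero (lo hi : Int) (h : hi < lo) : sumStep2 lo hi = 0 := by
  unfold sumStep2; rw [if_pos (by omega)]

lemma sumStep2_step (lo h : Int) (hpar : (lo - h) % 2 = 0) (hle : lo ≤ h + 2) :
    sumStep2 lo (h + 2) = sumStep2 lo h + (h + 2) := by
  by_cases hch : lo ≤ h
  · obtain ⟨k, hk0, hk⟩ : ∃ k, 0 ≤ k ∧ h = lo + 2 * k := ⟨(h - lo) / 2, by omega, by omega⟩
    rw [show h + 2 = lo + 2 * (k + 1) by omega, hk,
      sumStep2_repr lo (k + 1) (by omega), sumStep2_repr lo k hk0]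
    ring
  · have hlo : lo = h + 2 := by omega
    rw [show h + 2 = lo + 2 * 0 by omega, sumStep2_repr lo 0 le_rfl,
      sumStep2_zero lo h (by omega)]
    omega

-- one loop iteration of A, peeled off at the right end
lemma suma_p_i_step (A B : Int) (P_I : String) (h : A ≤ B) :
    suma_p_i A B P_I =
      (fun suma i =>
        let suma := if (PySem.Int.mod i 2 == 0) && (P_I == "P") then suma + i else suma
        if (!(PySem.Int.mod i 2 == 0)) && (P_I == "I") then suma + i else suma)
        (suma_p_i A (B - 1) P_I) B := by
  unfold suma_p_i
  rw [show B + 1 = B + 1 by rfl, PySem.List.pyRange_one_succ_right (a := A) (b := B) h,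
    List.foldl_append, show B - 1 + 1 = B by ring]
  rfl

lemma suma_p_i_empty (A B : Int) (P_I : String) (h : B < A) : suma_p_i A B P_I = 0 := by
  unfold suma_p_i
  rw [PySem.List.pyRange_one_eq_nil (by omega)]
  rfl

lemma main_eq (A B : Int) (P_I : String) : suma_p_i A B P_I = suma_p_i_alt A B P_I := by
  have hA := PySem.Int.mod_eq_emod_of_pos (a := A) (show (0:Int) < 2 by norm_num)
  have key : ∀ B : Int, A - 1 ≤ B → suma_p_i A B P_I = suma_p_i_alt A B P_I := by
    intro B hB
    induction B, hB using Int.le_induction with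
    | base =>
      have hB2 := PySem.Int.mod_eq_emod_of_pos (a := A - 1) (show (0:Int) < 2 by norm_num)
      rw [suma_p_i_empty A (A - 1) P_I (by omega)]
      unfold suma_p_i_alt
      split_ifs with h1 h2
      · rw [sumStep2_zero _ _ (by omega)]
      · rw [sumStep2_zero _ _ (by omega)]
      · rfl
    | succ B hAB ih =>
      have hBm := PySem.Int.mod_eq_emod_of_pos (a := B) (show (0:Int) < 2 by norm_num)
      have hB1 := PySem.Int.mod_eq_emod_of_pos (a := B + 1) (show (0:Int) < 2 by norm_num)
      rw [suma_p_i_step A (B + 1) P_I (by omega), show B + 1 - 1 = B by ring, ih]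
      simp only
      unfold suma_p_i_alt
      by_cases hP : P_I = "P"
      · subst hP
        simp only [beq_self_eq_true, Bool.and_true, String.reduceBEq, Bool.and_false,
          Bool.false_eq_true, if_false, if_pos]
        by_cases hev : PySem.Int.mod (B + 1) 2 == 0
        · rw [if_pos (by simpa using hev)]
          have hev' : (B + 1) % 2 = 0 := by
            have := beq_iff_eq.mp hev; omega
          rw [show B + 1 - PySem.Int.mod (B + 1) 2 = (B - PySem.Int.mod B 2) + 2 by omega]
          rw [sumStep2_step _ _ (by omega) (by omega)]
          omega
        · rw [if_neg (by simpa using hev)]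
          have hev' : (B + 1) % 2 = 1 := by
            have : ¬ ((B + 1) % 2 = 0) := by
              intro hc; exact hev (by simp only [hB1]; exact beq_iff_eq.mpr hc)
            omega
          rw [show B + 1 - PySem.Int.mod (B + 1) 2 = B - PySem.Int.mod B 2 by omega]
      · by_cases hI : P_I = "I"
        · subst hI
          simp only [String.reduceBEq, Bool.and_false, Bool.false_eq_true, if_false,
            beq_self_eq_true, Bool.and_true]
          by_cases hev : PySem.Int.mod (B + 1) 2 == 0
          · have hev' : (B + 1) % 2 = 0 := by
              have := beq_iff_eq.mp hev; omega
            have hm : PySem.Int.mod (B + 1) 2 = 0 := by omega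
            rw [if_neg (by simp only [hm]; decide)]
            rw [show B + 1 - 1 + PySem.Int.mod (B + 1) 2 = B - 1 + PySem.Int.mod B 2 by omega]
          · have hev' : (B + 1) % 2 = 1 := by
              have : ¬ ((B + 1) % 2 = 0) := by
                intro hc; exact hev (by simp only [hB1]; exact beq_iff_eq.mpr hc)
              omega
            have hm : PySem.Int.mod (B + 1) 2 = 1 := by omega
            rw [if_pos (by simp only [hm]; decide)]
            rw [show B + 1 - 1 + PySem.Int.mod (B + 1) 2 = (B - 1 + PySem.Int.mod B 2) + 2 by omega]
            rw [sumStep2_step _ _ (by omega) (by omega)]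
            simp only [if_true]
            omega
        · have h1 : (P_I == "P") = false := beq_eq_false_iff_ne.mpr hP
          have h2 : (P_I == "I") = false := beq_eq_false_iff_ne.mpr hI
          simp [h1, h2]
  by_cases h : A - 1 ≤ B
  · exact key B h
  · have hB2 := PySem.Int.mod_eq_emod_of_pos (a := B) (show (0:Int) < 2 by norm_num)
    rw [suma_p_i_empty A B P_I (by omega)]
    unfold suma_p_i_alt
    split_ifs with h1 h2
    · rw [sumStep2_zero _ _ (by omega)]
    · rw [sumStep2_zero _ _ (by omega)]
    · rfl

-- ===== VERDICT (by name: the statement is the Claim_ definition above) =====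
theorem suma_p_i_spec : Claim_equal_suma_p_i := by
  intro A B P_I _
  exact main_eq A B P_I
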